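-- pv_equiv track=rewrite | github.com/ausgerechnet/cwb-ccc | ccc/utils.py | _node2cotext
-- ===== SOURCE A (Python) =====
-- def _node2cotext(match, matchend, context, contextend):
--     """converts the four cpos-values of nodes into a dict of lists of
--     cpos, match, and offset
--
--     """
--     # get lists
--     cpos_list = list(range(context, contextend + 1))
--     match_list = [match] * len(cpos_list)
--     offset_list = [
--         (cpos - match) if cpos < match else
--         (cpos - matchend) if cpos > matchend else
--         0 for cpos in cpos_list
--     ]
--
--     # return object
--     result = {
--         'match_list': match_list,
--         'cpos_list': cpos_list,
--         'offset_list': offset_list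
--     }
--
--     return result
-- ===== SOURCE B (Python) =====
-- def _node2cotext(match, matchend, context, contextend):
--     """converts the four cpos-values of nodes into a dict of lists of
--     cpos, match, and offset (region-wise construction, no per-element branching)
--     """
--     cpos_list = list(range(context, contextend + 1))
--     match_list = [match] * len(cpos_list)
--     # clamp the three offset regions to the window and concatenate them
--     lo = min(max(match, context), contextend + 1)      # start of the zero run
--     hi = min(max(matchend + 1, lo), contextend + 1)    # start of the 'after' run
--     offset_list = (
--         [cpos - match for cpos in range(context, lo)]
--         + [0] * (hi - lo)
--         + [cpos - matchend for cpos in range(hi, contextend + 1)]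
--     )
--     return {'match_list': match_list, 'cpos_list': cpos_list, 'offset_list': offset_list}
-- ===== Notes on version B (the rewrite author's own statement) =====
-- stated objective: alternative
-- what changed: Replaces the per-element conditional comprehension over the whole window by clamping the three offset regions (before/zero/after) to the window and concatenating two plain ranges and a zero run.
import Mathlib
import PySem

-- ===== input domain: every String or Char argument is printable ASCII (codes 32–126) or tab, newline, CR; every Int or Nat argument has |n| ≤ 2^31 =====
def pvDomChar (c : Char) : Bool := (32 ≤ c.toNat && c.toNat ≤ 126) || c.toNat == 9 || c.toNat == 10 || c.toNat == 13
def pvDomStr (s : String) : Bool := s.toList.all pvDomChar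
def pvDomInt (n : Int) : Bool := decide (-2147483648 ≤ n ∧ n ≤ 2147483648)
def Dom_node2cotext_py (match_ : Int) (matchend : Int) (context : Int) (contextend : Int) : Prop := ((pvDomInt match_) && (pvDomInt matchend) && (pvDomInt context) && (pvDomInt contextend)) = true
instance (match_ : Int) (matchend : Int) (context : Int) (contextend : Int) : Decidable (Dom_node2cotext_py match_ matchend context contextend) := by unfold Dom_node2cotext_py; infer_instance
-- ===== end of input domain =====

-- B builds the offset list region-wise (clamped before/zero/after runs, concatenated) instead of a branching comprehension; same cost, different decomposition.

-- ===== PORT A =====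
def node2cotext_py (match_ : Int) (matchend : Int) (context : Int) (contextend : Int) : List (String × List Int) :=
  let cpos_list := PySem.List.pyRange context (contextend + 1) 1
  let match_list := List.replicate cpos_list.length match_
  let offset_list := cpos_list.map (fun cpos =>
    if cpos < match_ then cpos - match_
    else if cpos > matchend then cpos - matchend
    else 0)
  [("match_list", match_list), ("cpos_list", cpos_list), ("offset_list", offset_list)]

-- ===== PORT B =====
def node2cotext_py_alt (match_ : Int) (matchend : Int) (context : Int) (contextend : Int) : List (String × List Int) :=
  let cpos_list := PySem.List.pyRange context (contextend + 1) 1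
  let match_list := List.replicate cpos_list.length match_
  let lo := min (max match_ context) (contextend + 1)
  let hi := min (max (matchend + 1) lo) (contextend + 1)
  let offset_list :=
    (PySem.List.pyRange context lo 1).map (fun cpos => cpos - match_)
    ++ List.replicate (hi - lo).toNat 0
    ++ (PySem.List.pyRange hi (contextend + 1) 1).map (fun cpos => cpos - matchend)
  [("match_list", match_list), ("cpos_list", cpos_list), ("offset_list", offset_list)]

-- ===== PRECONDITION & SPEC =====
def Spec_node2cotext_py (match_ : Int) (matchend : Int) (context : Int) (contextend : Int) (out : List (String × List Int)) : Prop := out = node2cotext_py_alt match_ matchend context contextend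
instance (match_ : Int) (matchend : Int) (context : Int) (contextend : Int) (out : List (String × List Int)) : Decidable (Spec_node2cotext_py match_ matchend context contextend out) := by unfold Spec_node2cotext_py; infer_instance

-- ===== CLAIM (what is proved, stated in full; the proofs are below) =====
def Claim_equal_node2cotext_py : Prop := ∀ (match_ : Int) (matchend : Int) (context : Int) (contextend : Int), Dom_node2cotext_py match_ matchend context contextend → Spec_node2cotext_py match_ matchend context contextend (node2cotext_py match_ matchend context contextend)

-- ===== LEMMAS AND PROOFS =====

theorem offset_eq (match_ matchend context contextend : Int) :
    (PySem.List.pyRange context (contextend + 1) 1).map (fun cpos =>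
      if cpos < match_ then cpos - match_
      else if cpos > matchend then cpos - matchend
      else 0)
    = (PySem.List.pyRange context (min (max match_ context) (contextend + 1)) 1).map (fun cpos => cpos - match_)
      ++ List.replicate ((min (max (matchend + 1) (min (max match_ context) (contextend + 1))) (contextend + 1)
            - min (max match_ context) (contextend + 1))).toNat 0
      ++ (PySem.List.pyRange (min (max (matchend + 1) (min (max match_ context) (contextend + 1))) (contextend + 1))
            (contextend + 1) 1).map (fun cpos => cpos - matchend) := by
  set lo := min (max match_ context) (contextend + 1) with hlo
  set hi := min (max (matchend + 1) lo) (contextend + 1) with hhi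
  by_cases hwin : contextend + 1 ≤ context
  · rw [PySem.List.pyRange_one_eq_nil hwin,
      PySem.List.pyRange_one_eq_nil (show lo ≤ context by omega),
      PySem.List.pyRange_one_eq_nil (show contextend + 1 ≤ hi by omega)]
    have : (hi - lo).toNat = 0 := by omega
    simp [this]
  · -- split the window at lo and hi
    have h1 : context ≤ lo := by omega
    have h2 : lo ≤ hi := by omega
    have h3 : hi ≤ contextend + 1 := by omega
    rw [PySem.List.pyRange_one_append context lo (contextend + 1) h1 (by omega),
      PySem.List.pyRange_one_append lo hi (contextend + 1) h2 h3,
      List.map_append, List.map_append, List.append_assoc]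
    congr 1
    · apply List.map_congr_left
      intro c hc
      rw [PySem.List.mem_pyRange_one] at hc
      have : c < match_ := by omega
      simp [this]
    congr 1
    · have hrep : List.replicate ((hi - lo).toNat) (0 : Int)
          = (PySem.List.pyRange lo hi 1).map (fun _ => (0 : Int)) := by
        simp [List.map_const', PySem.List.length_pyRange_one]
      rw [hrep]
      apply List.map_congr_left
      intro c hc
      rw [PySem.List.mem_pyRange_one] at hc
      have h4 : ¬ c < match_ := by omega
      have h5 : ¬ c > matchend := by omega
      simp [h4, h5]
    · apply List.map_congr_left
      intro c hc
      rw [PySem.List.mem_pyRange_one] at hc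
      have h4 : ¬ c < match_ := by omega
      have h5 : c > matchend := by omega
      simp [h4, h5]

-- ===== VERDICT (by name: the statement is the Claim_ definition above) =====
theorem node2cotext_py_spec : Claim_equal_node2cotext_py := by
  intro match_ matchend context contextend _
  unfold Spec_node2cotext_py node2cotext_py node2cotext_py_alt
  simp only
  rw [offset_eq]
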